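-- pv_equiv track=rewrite | github.com/Beeeennn/beenbagv2 | services/room_gen2.py | _stair_run_columns
-- ===== SOURCE A (Python) =====
-- from typing import Dict, List, Tuple, Optional, Union, Iterable
--
-- def _stair_run_columns(x_start: int, rise_tiles: int, dir_lr: str, w_tiles: int) -> List[int]:
--     """Columns touched if using 1 tile per vertical tile; still useful as an approximation for gap logic."""
--     cols = []
--     if dir_lr == "r":
--         for i in range(rise_tiles):
--             x = x_start + i
--             if 0 <= x < w_tiles:
--                 cols.append(x)
--     else:  # "l"
--         for i in range(rise_tiles):
--             x = x_start - i
--             if 0 <= x < w_tiles: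
--                 cols.append(x)
--     return cols
-- ===== SOURCE B (Python) =====
-- from typing import List
--
-- def _stair_run_columns(x_start: int, rise_tiles: int, dir_lr: str, w_tiles: int) -> List[int]:
--     """Columns touched if using 1 tile per vertical tile; still useful as an approximation for gap logic."""
--     if dir_lr == "r":
--         return list(range(max(0, x_start), min(w_tiles, x_start + rise_tiles)))
--     lo = max(0, x_start - rise_tiles + 1)
--     hi = min(w_tiles, x_start + 1)
--     return list(range(lo, hi))[::-1]
-- ===== Notes on version B (the rewrite author's own statement) =====
-- stated objective: simpler
-- what changed: Replaces the per-step bounds-checked append loop by O(1) clamping arithmetic: the run's endpoints are computed with max/min and the column list is materialized as a single range (reversed for the 'l' direction).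
import Mathlib
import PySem

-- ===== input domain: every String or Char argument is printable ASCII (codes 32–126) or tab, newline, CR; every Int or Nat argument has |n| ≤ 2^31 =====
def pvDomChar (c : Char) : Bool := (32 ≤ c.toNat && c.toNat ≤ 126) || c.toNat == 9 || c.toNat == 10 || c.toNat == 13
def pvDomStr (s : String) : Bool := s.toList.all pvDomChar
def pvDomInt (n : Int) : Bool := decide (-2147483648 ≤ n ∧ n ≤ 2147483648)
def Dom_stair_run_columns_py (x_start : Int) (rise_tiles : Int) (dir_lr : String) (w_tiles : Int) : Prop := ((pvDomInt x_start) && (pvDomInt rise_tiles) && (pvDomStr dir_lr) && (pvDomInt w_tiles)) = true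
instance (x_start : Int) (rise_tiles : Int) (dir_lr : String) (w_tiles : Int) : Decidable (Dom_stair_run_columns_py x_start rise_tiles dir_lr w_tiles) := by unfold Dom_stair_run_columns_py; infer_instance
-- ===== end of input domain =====

-- B replaces A's per-step bounds-checked append loop by O(1) clamping arithmetic producing one range (reversed for 'l'); objective: simpler.

-- ===== PORT A =====
def stair_run_columns_py (x_start : Int) (rise_tiles : Int) (dir_lr : String) (w_tiles : Int) : List Int :=
  if dir_lr == "r" then
    (PySem.List.pyRange 0 rise_tiles 1).foldl (fun cols i =>
      let x := x_start + i
      if 0 ≤ x ∧ x < w_tiles then cols ++ [x] else cols) []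
  else
    (PySem.List.pyRange 0 rise_tiles 1).foldl (fun cols i =>
      let x := x_start - i
      if 0 ≤ x ∧ x < w_tiles then cols ++ [x] else cols) []

-- ===== PORT B =====
def stair_run_columns_py_alt (x_start : Int) (rise_tiles : Int) (dir_lr : String) (w_tiles : Int) : List Int :=
  if dir_lr == "r" then
    PySem.List.pyRange (max 0 x_start) (min w_tiles (x_start + rise_tiles)) 1
  else
    (PySem.List.pyRange (max 0 (x_start - rise_tiles + 1)) (min w_tiles (x_start + 1)) 1).reverse

-- ===== PRECONDITION & SPEC =====
def Spec_stair_run_columns_py (x_start : Int) (rise_tiles : Int) (dir_lr : String) (w_tiles : Int) (out : List Int) : Prop := out = stair_run_columns_py_alt x_start rise_tiles dir_lr w_tiles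
instance (x_start : Int) (rise_tiles : Int) (dir_lr : String) (w_tiles : Int) (out : List Int) : Decidable (Spec_stair_run_columns_py x_start rise_tiles dir_lr w_tiles out) := by unfold Spec_stair_run_columns_py; infer_instance

-- ===== CLAIM (what is proved, stated in full; the proofs are below) =====
def Claim_equal_stair_run_columns_py : Prop := ∀ (x_start : Int) (rise_tiles : Int) (dir_lr : String) (w_tiles : Int), Dom_stair_run_columns_py x_start rise_tiles dir_lr w_tiles → Spec_stair_run_columns_py x_start rise_tiles dir_lr w_tiles (stair_run_columns_py x_start rise_tiles dir_lr w_tiles)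

-- ===== LEMMAS AND PROOFS =====

theorem r_run (x w : Int) (m : Nat) :
    (PySem.List.pyRange 0 (m : Int) 1).foldl (fun cols i =>
      let xx := x + i
      if 0 ≤ xx ∧ xx < w then cols ++ [xx] else cols) []
    = PySem.List.pyRange (max 0 x) (min w (x + m)) 1 := by
  induction m with
  | zero =>
      rw [PySem.List.pyRange_one_eq_nil (by omega)]
      rw [PySem.List.pyRange_one_eq_nil (le_trans (min_le_right _ _) (by omega))]
      rfl
  | succ m ih =>
      rw [show ((m + 1 : Nat) : Int) = (m : Int) + 1 by push_cast; ring,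
        PySem.List.pyRange_one_succ_right (by omega), List.foldl_append, ih]
      simp only [List.foldl]
      by_cases h : 0 ≤ x + (m : Int) ∧ x + (m : Int) < w
      · rw [if_pos h]
        rw [show min w (x + ((m : Int) + 1)) = (x + m) + 1 by omega,
          PySem.List.pyRange_one_succ_right (by omega),
          show min w (x + (m : Int)) = x + m by omega]
      · rw [if_neg h]
        rcases lt_or_ge (x + (m : Int)) 0 with hneg | hge
        · rw [PySem.List.pyRange_one_eq_nil (le_trans (min_le_right _ _) (by omega)),
            PySem.List.pyRange_one_eq_nil (le_trans (min_le_right _ _) (by omega))]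
        · have hw : w ≤ x + (m : Int) := by omega
          rw [show min w (x + ((m : Int) + 1)) = w by omega, show min w (x + (m : Int)) = w by omega]

theorem l_run (x w : Int) (m : Nat) :
    (PySem.List.pyRange 0 (m : Int) 1).foldl (fun cols i =>
      let xx := x - i
      if 0 ≤ xx ∧ xx < w then cols ++ [xx] else cols) []
    = (PySem.List.pyRange (max 0 (x - m + 1)) (min w (x + 1)) 1).reverse := by
  induction m with
  | zero =>
      rw [PySem.List.pyRange_one_eq_nil (le_trans (min_le_right _ _) (by omega))]
      rfl
  | succ m ih =>
      rw [show ((m + 1 : Nat) : Int) = (m : Int) + 1 by push_cast; ring,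
        PySem.List.pyRange_one_succ_right (by omega), List.foldl_append, ih]
      simp only [List.foldl]
      by_cases h : 0 ≤ x - (m : Int) ∧ x - (m : Int) < w
      · rw [if_pos h]
        have h1 : max 0 (x - ((m : Int) + 1) + 1) = x - (m : Int) := by omega
        have h2 : x - (m : Int) < min w (x + 1) := by omega
        have h3 : x - (m : Int) + 1 = max 0 (x - (m : Int) + 1) := by omega
        rw [h1, PySem.List.pyRange_one_cons h2, List.reverse_cons, ← h3]
      · rw [if_neg h]
        rcases lt_or_ge (x - (m : Int)) 0 with hneg | hge
        · have h1 : max 0 (x - ((m : Int) + 1) + 1) = max 0 (x - (m : Int) + 1) := by omega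
          rw [h1]
        · have hw : w ≤ x - (m : Int) := by omega
          have h1 : min w (x + 1) ≤ max 0 (x - (m : Int) + 1) := by
            rcases le_total 0 (x - (m : Int) + 1) with h' | h' <;> omega
          have h2 : min w (x + 1) ≤ max 0 (x - ((m : Int) + 1) + 1) := by
            rcases le_total 0 (x - ((m : Int) + 1) + 1) with h' | h' <;> omega
          rw [PySem.List.pyRange_one_eq_nil h1, PySem.List.pyRange_one_eq_nil h2]

-- ===== VERDICT (by name: the statement is the Claim_ definition above) =====
theorem stair_run_columns_py_spec : Claim_equal_stair_run_columns_py := by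
  intro x r d w _
  unfold Spec_stair_run_columns_py stair_run_columns_py stair_run_columns_py_alt
  rcases le_total r 0 with hr | hr
  · rw [PySem.List.pyRange_one_eq_nil (by omega)]
    split
    · rw [PySem.List.pyRange_one_eq_nil (le_trans (min_le_right _ _) (by omega))]
      rfl
    · rw [PySem.List.pyRange_one_eq_nil (le_trans (min_le_right _ _) (by omega))]
      rfl
  · obtain ⟨m, hm⟩ : ∃ m : Nat, r = (m : Int) := ⟨r.toNat, by omega⟩
    subst hm
    split
    · exact r_run x w m
    · exact l_run x w m
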